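-- pv_equiv track=rewrite | github.com/omergamliel3/code-challenges | solutions/best_time_to_sell_stock.py | find_rising_sequences
-- ===== SOURCE A (Python) =====
-- def find_rising_sequences(prices: list[int]) -> list[list[int]]:
--     rising_sequences = []
--     i = 0
--     while i < len(prices) - 1:
--         if prices[i] < prices[i + 1]:
--             sequence = []
--             sequence.append(prices[i])
--             i += 1
--
--             while i < len(prices) - 1 and prices[i] < prices[i + 1]:
--                 sequence.append(prices[i])
--                 i += 1
--
--             sequence.append(prices[i])
--             rising_sequences.append(sequence)
--
--         i += 1
--
--     return rising_sequences
-- ===== SOURCE B (Python) =====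
-- def find_rising_sequences(prices: list[int]) -> list[list[int]]:
--     rising_sequences = []
--     start = None
--     for j in range(len(prices) - 1):
--         if prices[j] < prices[j + 1]:
--             if start is None:
--                 start = j
--         else:
--             if start is not None:
--                 rising_sequences.append(prices[start:j + 1])
--                 start = None
--     if start is not None:
--         rising_sequences.append(prices[start:])
--     return rising_sequences
-- ===== Notes on version B (the rewrite author's own statement) =====
-- stated objective: simpler
-- what changed: Replaces A's nested while loops that append element by element with a single flat pass that tracks the start index of the current rising run and emits each run as one slice prices[start:j+1].
import Mathlib
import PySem

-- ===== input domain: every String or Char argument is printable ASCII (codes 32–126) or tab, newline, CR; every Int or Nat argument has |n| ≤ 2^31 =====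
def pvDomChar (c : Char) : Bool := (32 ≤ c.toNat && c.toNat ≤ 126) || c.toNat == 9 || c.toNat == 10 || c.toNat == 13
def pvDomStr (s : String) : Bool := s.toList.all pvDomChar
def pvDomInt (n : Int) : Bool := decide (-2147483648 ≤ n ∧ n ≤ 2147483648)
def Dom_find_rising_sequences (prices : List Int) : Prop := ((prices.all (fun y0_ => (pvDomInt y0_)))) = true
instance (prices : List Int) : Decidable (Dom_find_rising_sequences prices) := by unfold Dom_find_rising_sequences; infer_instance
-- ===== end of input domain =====

-- B replaces A's nested while loops with one flat pass tracking the start of the current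
-- rising run and emitting slices; objective: simpler.
-- Port notes: both loops carry a fuel parameter (= prices.length at entry) purely to make the
-- same computation structurally recursive; fuel never runs out on the actual calls.
-- Every Python prices[i] access is guarded in range, so `prices.getD i 0` is exact for it.

-- ===== PORT A =====
-- inner while loop of A: `while i < len(prices)-1 and prices[i] < prices[i+1]: sequence.append(prices[i]); i += 1`
def pvInnerA : Nat → List Int → Nat → List Int → List Int × Nat
  | 0, _, i, seq => (seq, i)
  | fuel+1, prices, i, seq =>
    if i + 1 < prices.length ∧ prices.getD i 0 < prices.getD (i+1) 0 then
      pvInnerA fuel prices (i+1) (seq ++ [prices.getD i 0])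
    else (seq, i)

-- outer while loop of A
def pvOuterA : Nat → List Int → Nat → List (List Int) → List (List Int)
  | 0, _, _, acc => acc
  | fuel+1, prices, i, acc =>
    if i + 1 < prices.length then
      if prices.getD i 0 < prices.getD (i+1) 0 then
        -- sequence = [prices[i]]; i += 1; inner while; sequence.append(prices[i])
        let r := pvInnerA prices.length prices (i+1) [prices.getD i 0]
        pvOuterA fuel prices (r.2 + 1) (acc ++ [r.1 ++ [prices.getD r.2 0]])
      else pvOuterA fuel prices (i+1) acc
    else acc

def find_rising_sequences (prices : List Int) : List (List Int) :=
  pvOuterA prices.length prices 0 []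

-- ===== PORT B =====
-- the single for-loop of B over range(len(prices)-1), carrying (start, rising_sequences);
-- the trailing `if start is not None: append(prices[start:])` is the fuel-out/end-of-range branch.
-- prices[s:j+1] = (prices.take (j+1)).drop s and prices[s:] = prices.drop s (indices ≥ 0, exact).
def pvLoopB : Nat → List Int → Nat → Option Nat → List (List Int) → List (List Int)
  | 0, prices, _, start, acc =>
    match start with
    | some s => acc ++ [prices.drop s]
    | none => acc
  | fuel+1, prices, j, start, acc =>
    if j + 1 < prices.length then
      if prices.getD j 0 < prices.getD (j+1) 0 then
        pvLoopB fuel prices (j+1) (some (start.getD j)) acc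
      else
        match start with
        | some s => pvLoopB fuel prices (j+1) none (acc ++ [(prices.take (j+1)).drop s])
        | none => pvLoopB fuel prices (j+1) none acc
    else
      match start with
      | some s => acc ++ [prices.drop s]
      | none => acc

def find_rising_sequences_alt (prices : List Int) : List (List Int) :=
  pvLoopB prices.length prices 0 none []

-- ===== PRECONDITION & SPEC =====
def Spec_find_rising_sequences (prices : List Int) (out : List (List Int)) : Prop := out = find_rising_sequences_alt prices
instance (prices : List Int) (out : List (List Int)) : Decidable (Spec_find_rising_sequences prices out) := by unfold Spec_find_rising_sequences; infer_instance

-- ===== CLAIM (what is proved, stated in full; the proofs are below) =====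
def Claim_equal_find_rising_sequences : Prop := ∀ (prices : List Int), Dom_find_rising_sequences prices → Spec_find_rising_sequences prices (find_rising_sequences prices)

-- ===== LEMMAS AND PROOFS =====

-- segment prices[s:i]
theorem pvSeg_succ (l : List Int) (s i : Nat) (hs : s ≤ i) (hi : i < l.length) :
    (l.take i).drop s ++ [l.getD i 0] = (l.take (i+1)).drop s := by
  rw [List.take_add_one]
  have h1 : l[i]? = some (l.getD i 0) := by
    simp [List.getElem?_eq_getElem hi]
  rw [h1, List.drop_append_of_le_length (by simp; omega)]
  simp

theorem pvSeg_single (l : List Int) (i : Nat) (hi : i < l.length) :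
    [l.getD i 0] = (l.take (i+1)).drop i := by
  have := pvSeg_succ l i i (le_refl i) hi
  simpa using this

-- combined invariant: part 1 relates the two outer loops, part 2 relates B's in-run state
-- (start = some s) to A's inner loop running on the segment collected so far.
theorem pvMain (prices : List Int) :
    ∀ k i, prices.length - i = k →
      (∀ fa fb acc, prices.length - i ≤ fa → prices.length - i ≤ fb →
        pvLoopB fb prices i none acc = pvOuterA fa prices i acc) ∧
      (∀ fi fa fb s acc, s ≤ i → i < prices.length →
          prices.length - i ≤ fi → prices.length - i ≤ fb → prices.length - i ≤ fa + 1 →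
        pvLoopB fb prices i (some s) acc =
          pvOuterA fa prices ((pvInnerA fi prices i ((prices.take i).drop s)).2 + 1)
            (acc ++ [(pvInnerA fi prices i ((prices.take i).drop s)).1 ++
                     [prices.getD (pvInnerA fi prices i ((prices.take i).drop s)).2 0]])) := by
  intro k
  induction k using Nat.strong_induction_on with
  | _ k ih =>
    intro i hk
    constructor
    · intro fa fb acc hfa hfb
      by_cases h1 : i + 1 < prices.length
      · obtain ⟨fa', rfl⟩ : ∃ fa', fa = fa' + 1 := ⟨fa - 1, by omega⟩
        obtain ⟨fb', rfl⟩ : ∃ fb', fb = fb' + 1 := ⟨fb - 1, by omega⟩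
        simp only [pvLoopB, pvOuterA, if_pos h1]
        by_cases h2 : prices.getD i 0 < prices.getD (i+1) 0
        · simp only [if_pos h2, Option.getD_none]
          have hrec := (ih (prices.length - (i+1)) (by omega) (i+1) rfl).2
            prices.length fa' fb' i acc (Nat.le_succ i) h1 (by omega) (by omega) (by omega)
          rw [← pvSeg_single prices i (by omega)] at hrec
          exact hrec
        · simp only [if_neg h2]
          exact (ih (prices.length - (i+1)) (by omega) (i+1) rfl).1 fa' fb' acc
            (by omega) (by omega)
      · match fa, fb with
        | 0, 0 => simp [pvLoopB, pvOuterA]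
        | 0, fb'+1 => simp [pvLoopB, pvOuterA, if_neg h1]
        | fa'+1, 0 => simp [pvLoopB, pvOuterA, if_neg h1]
        | fa'+1, fb'+1 => simp [pvLoopB, pvOuterA, if_neg h1]
    · intro fi fa fb s acc hs hi hfi hfb hfa
      obtain ⟨fi', rfl⟩ : ∃ fi', fi = fi' + 1 := ⟨fi - 1, by omega⟩
      obtain ⟨fb', rfl⟩ : ∃ fb', fb = fb' + 1 := ⟨fb - 1, by omega⟩
      by_cases h1 : i + 1 < prices.length
      · simp only [pvLoopB, pvInnerA, if_pos h1]
        by_cases h2 : prices.getD i 0 < prices.getD (i+1) 0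
        · simp only [if_pos h2, if_pos (And.intro h1 h2), Option.getD_some]
          have hrec := (ih (prices.length - (i+1)) (by omega) (i+1) rfl).2
            fi' fa fb' s acc (by omega) h1 (by omega) (by omega) (by omega)
          rw [← pvSeg_succ prices s i hs hi] at hrec
          exact hrec
        · simp only [if_neg h2,
            if_neg (by tauto : ¬(i + 1 < prices.length ∧ prices.getD i 0 < prices.getD (i+1) 0))]
          have hrec := (ih (prices.length - (i+1)) (by omega) (i+1) rfl).1 fa fb'
            (acc ++ [(prices.take (i+1)).drop s]) (by omega) (by omega)
          rw [hrec, ← pvSeg_succ prices s i hs hi]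
      · have hlen : i + 1 = prices.length := by omega
        simp only [pvLoopB, pvInnerA, if_neg h1,
          if_neg (by tauto : ¬(i + 1 < prices.length ∧ prices.getD i 0 < prices.getD (i+1) 0))]
        have hgoal : prices.drop s = (prices.take i).drop s ++ [prices.getD i 0] := by
          rw [pvSeg_succ prices s i hs hi, hlen, List.take_length]
        match fa with
        | 0 => simp only [pvOuterA]; rw [hgoal]
        | fa'+1 =>
          simp only [pvOuterA, if_neg (by omega : ¬ (i + 1 + 1 < prices.length))]
          rw [hgoal]

-- ===== VERDICT (by name: the statement is the Claim_ definition above) =====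
theorem find_rising_sequences_spec : Claim_equal_find_rising_sequences := by
  intro prices _
  unfold Spec_find_rising_sequences find_rising_sequences find_rising_sequences_alt
  exact ((pvMain prices (prices.length - 0) 0 rfl).1 prices.length prices.length []
    (by omega) (by omega)).symm
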